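-- pv_equiv track=rewrite | github.com/NikolaiTunin/CNN | local code/test.py | take_terms
-- ===== SOURCE A (Python) =====
-- def take_terms(data_array):
--     terms = []
--     line_terms = []
--     term = ''
--     for line in data_array:
--         for char in line:
--             if (ord(char) >= 65) & (ord(char) <= 122) | (ord(char) == 39):
--                 term += char.lower()
--             else:
--                 if term != '':
--                     line_terms.append(term)
--                     term = ''
--         terms.append(line_terms)
--         line_terms = []
--     return terms
-- ===== SOURCE B (Python) =====
-- _TBL = {c: (c + 32 if 65 <= c <= 90 else c) if (65 <= c <= 122 or c == 39) else 32
--         for c in range(128)}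
--
-- def take_terms(data_array):
--     terms = []
--     carry = []          # pieces of a term left open at a line boundary (never joined until flushed)
--     for line in data_array:
--         s = line.translate(_TBL)
--         toks = s.split()
--         line_terms = []
--         if carry and s and s[0] == ' ':
--             line_terms.append(''.join(carry))
--             carry = []
--         if toks:
--             if s[-1] != ' ':
--                 closed, pending = toks[:-1], toks[-1]
--             else:
--                 closed, pending = toks, None
--             if carry:                       # s starts with a term char: toks[0] continues carry
--                 if closed:
--                     carry.append(closed[0])
--                     line_terms.append(''.join(carry))
--                     carry = []
--                     line_terms.extend(closed[1:])
--                     if pending is not None: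
--                         carry = [pending]
--                 else:                       # the whole line is one still-open token
--                     carry.append(pending)
--             else:
--                 line_terms.extend(closed)
--                 if pending is not None:
--                     carry = [pending]
--         terms.append(line_terms)
--     return terms
-- ===== Notes on version B (the rewrite author's own statement) =====
-- stated objective: alternative
-- what changed: Replaced the char-by-char state machine (term/line_terms accumulators) by a per-line translate-to-spaces + str.split() pass, with a term left open at a line boundary kept as a list of carried pieces joined only when flushed.
import Mathlib
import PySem

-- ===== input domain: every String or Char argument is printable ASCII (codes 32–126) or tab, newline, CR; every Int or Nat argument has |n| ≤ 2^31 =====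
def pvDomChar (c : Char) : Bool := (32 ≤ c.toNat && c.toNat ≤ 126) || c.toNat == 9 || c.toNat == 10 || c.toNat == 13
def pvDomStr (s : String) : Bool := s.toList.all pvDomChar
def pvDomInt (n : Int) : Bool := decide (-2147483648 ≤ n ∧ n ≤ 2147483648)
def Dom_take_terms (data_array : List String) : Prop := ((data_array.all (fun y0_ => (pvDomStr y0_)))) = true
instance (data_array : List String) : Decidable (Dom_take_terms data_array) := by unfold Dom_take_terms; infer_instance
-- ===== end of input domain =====

-- B replaces A's character-by-character state machine by a per-line "blank out non-term
-- characters, then str.split()" pass, keeping a term left open at a line end as a list of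
-- carried pieces (an alternative algorithm of the same asymptotic cost).

-- ===== PORT A =====
-- A's test `(ord(char) >= 65) & (ord(char) <= 122) | (ord(char) == 39)` (on bools & | are
-- and/or, & binding tighter): (65 ≤ ord c ∧ ord c ≤ 122) ∨ ord c = 39.  Both Pythons share it.
def pvTermChar (c : Char) : Bool :=
  (decide (65 ≤ c.toNat) && decide (c.toNat ≤ 122)) || decide (c.toNat = 39)


-- body of A's inner `for char in line` loop; state = (line_terms, term), strings as List Char
def pvInnerA (p : List (List Char) × List Char) (c : Char) : List (List Char) × List Char :=
  if pvTermChar c then (p.1, p.2 ++ [PySem.Chars.lowerChar c])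
  else if p.2 ≠ [] then (p.1 ++ [p.2], []) else (p.1, p.2)


-- body of A's outer `for line in data_array` loop; state = (terms, line_terms, term)
def pvStepA (st : List (List (List Char)) × List (List Char) × List Char) (line : String) :
    List (List (List Char)) × List (List Char) × List Char :=
  let p := line.toList.foldl pvInnerA (st.2.1, st.2.2)
  (st.1 ++ [p.1], [], p.2)


def take_terms (data_array : List String) : List (List String) :=
  ((data_array.foldl pvStepA ([], [], [])).1).map (fun lt => lt.map String.ofList)

-- ===== PORT B =====
-- `c.lower() if term-char else ' '` — B's _TBL translation applied to one character
def pvBlank (c : Char) : Char := if pvTermChar c then PySem.Chars.lowerChar c else ' '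


-- B's loop body: blank the line, s.split() it, then flush / merge / re-open the carried
-- term pieces exactly as Source B does (s[0], s[-1] ported as headD/getLastD, reached only
-- under the same non-emptiness guards as in the Python)
def pvStepB (st : List (List (List Char)) × List (List Char)) (line : String) :
    List (List (List Char)) × List (List Char) :=
  let s := line.toList.map pvBlank
  let toks := PySem.Chars.split₀ s
  let p1 : List (List Char) × List (List Char) :=
    if !st.2.isEmpty && !s.isEmpty && (s.headD ' ' == ' ') then
      ([PySem.Chars.join [] st.2], [])
    else ([], st.2)
  if !toks.isEmpty then
    let cp : List (List Char) × Option (List Char) :=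
      if !(s.getLastD ' ' == ' ') then (toks.dropLast, some (toks.getLastD []))
      else (toks, none)
    if !p1.2.isEmpty then
      if !cp.1.isEmpty then
        (st.1 ++ [p1.1 ++ [PySem.Chars.join [] (p1.2 ++ [cp.1.headD []])] ++ cp.1.tail],
         match cp.2 with | some p => [p] | none => [])
      else
        (st.1 ++ [p1.1], p1.2 ++ [cp.2.getD []])
    else
      (st.1 ++ [p1.1 ++ cp.1],
       match cp.2 with | some p => [p] | none => [])
  else (st.1 ++ [p1.1], p1.2)


def take_terms_alt (data_array : List String) : List (List String) :=
  ((data_array.foldl pvStepB ([], [])).1).map (fun lt => lt.map String.ofList)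

-- ===== PRECONDITION & SPEC =====
def Spec_take_terms (data_array : List String) (out : List (List String)) : Prop := out = take_terms_alt data_array
instance (data_array : List String) (out : List (List String)) : Decidable (Spec_take_terms data_array out) := by unfold Spec_take_terms; infer_instance

-- ===== CLAIM (what is proved, stated in full; the proofs are below) =====
def Claim_equal_take_terms : Prop := ∀ (data_array : List String), Dom_take_terms data_array → Spec_take_terms data_array (take_terms data_array)

-- ===== LEMMAS AND PROOFS =====

lemma pvCharOfNat_toNat (n : Nat) (h : n < 55296) : (Char.ofNat n).toNat = n := by
  have hv : n.isValidChar := Or.inl h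
  simp [Char.ofNat, hv, Char.ofNatAux, Char.toNat]

lemma pvLower_nospace (c : Char) (h : pvTermChar c = true) :
    PySem.Chars.isspace (PySem.Chars.lowerChar c) = false := by
  have hn : (65 ≤ c.toNat ∧ c.toNat ≤ 122) ∨ c.toNat = 39 := by
    simp [pvTermChar] at h; omega
  unfold PySem.Chars.lowerChar
  split
  · next hu =>
    have h2 : 65 ≤ c.toNat ∧ c.toNat ≤ 90 := by
      simp [PySem.Chars.isupper, Char.le_def] at hu
      exact ⟨hu.1, hu.2⟩
    have := pvCharOfNat_toNat (c.toNat + 32) (by omega)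
    simp [PySem.Chars.isspace, this]
    omega
  · simp [PySem.Chars.isspace]
    omega


-- words-with-accumulator normal form of PySem.Chars.split₀
def pvWords : List Char → List Char → List (List Char)
  | cur, [] => if cur.isEmpty then [] else [cur]
  | cur, c :: r =>
    if PySem.Chars.isspace c then
      (if cur.isEmpty then pvWords [] r else cur :: pvWords [] r)
    else pvWords (cur ++ [c]) r


lemma pvSplit₀_go_eq (l : List Char) : ∀ cur acc,
    PySem.Chars.split₀.go l cur acc = acc.reverse ++ pvWords cur.reverse l := by
  induction l with
  | nil =>
    intro cur acc
    simp [PySem.Chars.split₀.go, pvWords]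
    split <;> simp_all
  | cons c r ih =>
    intro cur acc
    simp only [PySem.Chars.split₀.go, pvWords]
    by_cases hs : PySem.Chars.isspace c <;> simp [hs]
    · simp [ih]
      by_cases hc : cur = [] <;> simp [hc]
    · rw [ih]
      have : (c :: cur).reverse = cur.reverse ++ [c] := by simp
      simp [this]

lemma pvSplit₀_eq (s : List Char) : PySem.Chars.split₀ s = pvWords [] s := by
  simpa using pvSplit₀_go_eq s [] []

lemma pvWords_nospace (t : List Char) : ∀ cur, (∀ c ∈ t, PySem.Chars.isspace c = false) →
    pvWords cur t = if (cur ++ t).isEmpty then [] else [cur ++ t] := by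
  induction t with
  | nil => intro cur _; simp [pvWords]
  | cons c r ih =>
    intro cur h
    have hc : PySem.Chars.isspace c = false := h c (by simp)
    simp only [pvWords, hc, Bool.false_eq_true, ite_false]
    rw [ih (cur ++ [c]) (fun d hd => h d (by simp [hd]))]
    simp

lemma pvWords_split (t : List Char) : ∀ cur m, (∀ c ∈ t, PySem.Chars.isspace c = false) →
    pvWords cur (t ++ ' ' :: m) =
      (if (cur ++ t).isEmpty then [] else [cur ++ t]) ++ pvWords [] m := by
  induction t with
  | nil =>
    intro cur m _
    have hsp : PySem.Chars.isspace ' ' = true := by decide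
    simp only [List.nil_append, pvWords, hsp, if_true]
    by_cases hc : cur.isEmpty = true <;> simp_all [List.isEmpty_iff]
  | cons c r ih =>
    intro cur m h
    have hc : PySem.Chars.isspace c = false := h c (by simp)
    simp only [List.cons_append, pvWords, hc, Bool.false_eq_true, ite_false]
    rw [ih (cur ++ [c]) m (fun d hd => h d (by simp [hd]))]
    simp

lemma pvWords_ne_nil (m : List Char) : ∀ cur c, m.getLast? = some c →
    PySem.Chars.isspace c = false → pvWords cur m ≠ [] := by
  induction m with
  | nil => intro cur c h; simp at h
  | cons a r ih =>
    intro cur c h hc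
    cases hr : r with
    | nil =>
      subst hr
      simp at h; subst h
      simp [pvWords, hc]
    | cons b s =>
      have hlast : r.getLast? = some c := by
        rw [hr] at h ⊢
        simpa [List.getLast?_cons_cons] using h
      rw [← hr]
      by_cases ha : PySem.Chars.isspace a <;> simp [pvWords, ha]
      · by_cases hcur : cur = [] <;> simp [hcur]
        · exact ih [] c hlast hc
      · exact ih (cur ++ [a]) c hlast hc


-- A's inner loop is invariant under a line_terms prefix, and keeps term space-free
lemma pvInnerA_prefix (l : List Char) : ∀ lt t,
    l.foldl pvInnerA (lt, t) =
      (lt ++ (l.foldl pvInnerA ([], t)).1, (l.foldl pvInnerA ([], t)).2) := by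
  induction l with
  | nil => intro lt t; simp
  | cons c r ih =>
    intro lt t
    simp only [List.foldl_cons]
    by_cases hc : pvTermChar c
    · simp only [pvInnerA, hc, if_true]
      rw [ih lt (t ++ [PySem.Chars.lowerChar c]), ih [] (t ++ [PySem.Chars.lowerChar c])]
    · by_cases ht : t = []
      · simp only [pvInnerA, hc, ht, Bool.false_eq_true, if_false, ne_eq,
          not_true_eq_false, List.nil_append]
        exact ih lt []
      · simp only [pvInnerA, hc, ht, Bool.false_eq_true, if_false, ne_eq,
          not_false_eq_true, if_true, List.nil_append]
        rw [ih (lt ++ [t]) [], ih [t] []]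
        simp

lemma pvInnerA_nospace (l : List Char) : ∀ t, (∀ c ∈ t, PySem.Chars.isspace c = false) →
    ∀ c ∈ (l.foldl pvInnerA ([], t)).2, PySem.Chars.isspace c = false := by
  induction l with
  | nil => intro t ht; simpa using ht
  | cons c r ih =>
    intro t ht
    simp only [List.foldl_cons]
    by_cases hc : pvTermChar c
    · rw [pvInnerA_prefix]
      have := ih (t ++ [PySem.Chars.lowerChar c]) (by
        intro d hd
        rcases List.mem_append.mp hd with h | h
        · exact ht d h
        · simp at h; subst h; exact pvLower_nospace c hc)
      simpa [pvInnerA, hc] using this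
    · by_cases h0 : t = []
      · simpa [pvInnerA, hc, h0] using ih [] (by simp)
      · rw [show pvInnerA ([], t) c = ([t], []) by simp [pvInnerA, hc, h0]]
        rw [pvInnerA_prefix]
        simpa using ih [] (by simp)


lemma pvGetLast?_append_cons (xs : List Char) (y : Char) (m : List Char) :
    (xs ++ y :: m).getLast? = (y :: m).getLast? := by
  have h := List.getLast?_eq_some_getLast (l := y :: m) (by simp)
  simp [List.getLast?_append, h]

lemma pvGetLastD_irrel {α : Type} (m : List α) (hm : m ≠ []) (d d' : α) :
    m.getLastD d = m.getLastD d' := by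
  have h := List.getLast?_eq_some_getLast (l := m) hm
  simp [List.getLastD_eq_getLast?, h]

lemma pvBlank_space_or_nospace (c : Char) :
    pvBlank c = ' ' ∨ PySem.Chars.isspace (pvBlank c) = false := by
  by_cases hc : pvTermChar c
  · exact Or.inr (by simpa [pvBlank, hc] using pvLower_nospace c hc)
  · exact Or.inl (by simp [pvBlank, hc])

lemma pvSpace_true : PySem.Chars.isspace ' ' = true := by decide

lemma pvWords_cons_space (m : List Char) : pvWords [] (' ' :: m) = pvWords [] m := by
  simp [pvWords, pvSpace_true]


-- per-line core: A's machine from an empty line_terms = blank-and-split of term ++ line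
lemma pvMach (l : List Char) : ∀ t, (∀ c ∈ t, PySem.Chars.isspace c = false) →
    l.foldl pvInnerA ([], t) =
      (let s := t ++ l.map pvBlank
       let toks := pvWords [] s
       if !s.isEmpty && !(s.getLastD ' ' == ' ') then (toks.dropLast, toks.getLastD [])
       else (toks, [])) := by
  induction l with
  | nil =>
    intro t ht
    simp only [List.foldl_nil, List.map_nil, List.append_nil]
    by_cases ht0 : t = []
    · subst ht0; simp [pvWords]
    · have hlast_mem : t.getLastD ' ' ∈ t := by
        rw [List.getLastD_eq_getLast?, List.getLast?_eq_some_getLast (l := t) ht0]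
        exact List.getLast_mem ht0
      have hsp : PySem.Chars.isspace (t.getLastD ' ') = false := ht _ hlast_mem
      have hne : (t.getLastD ' ' == ' ') = false := by
        rw [beq_eq_false_iff_ne]
        intro h
        rw [h, pvSpace_true] at hsp
        exact Bool.true_eq_false.mp hsp
      have hne' : ¬ t.getLast?.getD ' ' = ' ' := by
        simpa [List.getLastD_eq_getLast?, beq_eq_false_iff_ne] using hne
      rw [pvWords_nospace t [] ht]
      simp [ht0, hne']
  | cons c r ih =>
    intro t ht
    simp only [List.foldl_cons, List.map_cons]
    by_cases hc : pvTermChar c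
    · have hx : pvInnerA ([], t) c = ([], t ++ [PySem.Chars.lowerChar c]) := by
        simp [pvInnerA, hc]
      have ht' : ∀ d ∈ t ++ [PySem.Chars.lowerChar c], PySem.Chars.isspace d = false := by
        intro d hd
        rcases List.mem_append.mp hd with h | h
        · exact ht d h
        · simp at h; subst h; exact pvLower_nospace c hc
      rw [hx, ih _ ht']
      have hb : pvBlank c = PySem.Chars.lowerChar c := by simp [pvBlank, hc]
      rw [hb, show t ++ PySem.Chars.lowerChar c :: r.map pvBlank
            = (t ++ [PySem.Chars.lowerChar c]) ++ r.map pvBlank by simp]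
    · have hb : pvBlank c = ' ' := by simp [pvBlank, hc]
      rw [hb]
      by_cases h0 : t = []
      · subst h0
        have hx : pvInnerA (([] : List (List Char)), ([] : List Char)) c = ([], []) := by
          simp [pvInnerA, hc]
        rw [hx, ih [] (by simp)]
        simp only [List.nil_append]
        rw [pvWords_cons_space]
        cases hm : r.map pvBlank with
        | nil => simp [pvWords]
        | cons b m' =>
          simp [List.getLastD_cons]
      · have hx : pvInnerA ([], t) c = ([t], []) := by simp [pvInnerA, hc, h0]
        rw [hx, pvInnerA_prefix, ih [] (by simp)]
        have hw : pvWords [] (t ++ ' ' :: r.map pvBlank)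
            = t :: pvWords [] (r.map pvBlank) := by
          rw [pvWords_split t [] (r.map pvBlank) ht]
          simp [h0]
        rw [hw, List.getLastD_eq_getLast?, pvGetLast?_append_cons]
        cases hm : r.map pvBlank with
        | nil =>
          simp [pvWords]
        | cons b m' =>
          have hmne : (b :: m') ≠ ([] : List Char) := by simp
          obtain ⟨x, hx2⟩ : ∃ x, (b :: m').getLast? = some x :=
            ⟨_, List.getLast?_eq_some_getLast hmne⟩
          have hmemx : x ∈ b :: m' := List.mem_of_getLast? hx2
          have hspf_or : x = ' ' ∨ PySem.Chars.isspace x = false := by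
            have hmemr : x ∈ List.map pvBlank r := by rw [hm]; exact hmemx
            rcases List.mem_map.mp hmemr with ⟨d, _, hd⟩
            rcases pvBlank_space_or_nospace d with h | h
            · exact Or.inl (by rw [← hd, h])
            · exact Or.inr (by rw [← hd]; exact h)
          by_cases hxsp : x = ' '
          · simp [List.getLastD_eq_getLast?, hx2, hxsp]
          · have hspf : PySem.Chars.isspace x = false := hspf_or.resolve_left hxsp
            have hWne : pvWords [] (b :: m') ≠ [] := pvWords_ne_nil (b :: m') [] x hx2 hspf
            have hconsLast : (t :: pvWords [] (b :: m')).getLast?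
                = (pvWords [] (b :: m')).getLast? := by
              cases hW : pvWords [] (b :: m') with
              | nil => exact absurd hW hWne
              | cons w ws => simp [List.getLast?_cons_cons]
            simp [hx2, hxsp, List.dropLast_cons_of_ne_nil hWne, hconsLast,
              List.getLastD_eq_getLast?]


lemma pvJoin_nil (parts : List (List Char)) : PySem.Chars.join [] parts = parts.flatten := by
  induction parts with
  | nil => rfl
  | cons p ps ih =>
    simp only [PySem.Chars.join, List.intercalate] at *
    cases ps with
    | nil => simp
    | cons q qs => simp_all [List.intersperse]

lemma pvWords_append_nospace (t : List Char) : ∀ cur m,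
    (∀ c ∈ t, PySem.Chars.isspace c = false) →
    pvWords cur (t ++ m) = pvWords (cur ++ t) m := by
  induction t with
  | nil => intro cur m _; simp
  | cons c r ih =>
    intro cur m h
    have hc : PySem.Chars.isspace c = false := h c (by simp)
    simp only [List.cons_append, pvWords, hc, Bool.false_eq_true, ite_false]
    rw [ih (cur ++ [c]) m (fun d hd => h d (by simp [hd]))]
    simp

lemma pvWords_head_decomp (m : List Char) : ∀ c cur, PySem.Chars.isspace c = false →
    pvWords cur (c :: m) =
      (cur ++ (pvWords [] (c :: m)).headD []) :: (pvWords [] (c :: m)).tail := by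
  induction m with
  | nil =>
    intro c cur hc
    simp [pvWords, hc]
  | cons d m' ih =>
    intro c cur hc
    by_cases hd : PySem.Chars.isspace d
    · simp [pvWords, hc, hd]
    · have e1 : pvWords cur (c :: d :: m') = pvWords (cur ++ [c]) (d :: m') := by
        simp [pvWords, hc]
      have e2 : pvWords [] (c :: d :: m') = pvWords [c] (d :: m') := by
        simp [pvWords, hc]
      rw [e1, e2, ih d (cur ++ [c]) (by simpa using hd), ih d [c] (by simpa using hd)]
      simp
lemma pvWords_tokens_ne_nil (m : List Char) : ∀ cur tok, tok ∈ pvWords cur m → tok ≠ [] := by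
  induction m with
  | nil =>
    intro cur tok h
    simp only [pvWords] at h
    by_cases hc : cur.isEmpty
    · simp [hc] at h
    · rw [if_neg hc] at h
      simp only [List.mem_singleton] at h
      subst h
      simpa [List.isEmpty_iff] using hc
  | cons c r ih =>
    intro cur tok h
    by_cases hc : PySem.Chars.isspace c
    · simp only [pvWords, hc, if_true] at h
      by_cases hcur : cur.isEmpty
      · rw [if_pos hcur] at h
        exact ih [] tok h
      · rw [if_neg hcur] at h
        rcases List.mem_cons.mp h with h | h
        · subst h; simpa [List.isEmpty_iff] using hcur
        · exact ih [] tok h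
    · simp only [pvWords, hc, Bool.false_eq_true, ite_false] at h
      exact ih (cur ++ [c]) tok h

def pvInv (carry : List (List Char)) : Prop :=
  (∀ p ∈ carry, p ≠ []) ∧ (∀ c ∈ carry.flatten, PySem.Chars.isspace c = false)

lemma pvBlank_images (line : List Char) :
    ∀ c ∈ line.map pvBlank, c = ' ' ∨ PySem.Chars.isspace c = false := by
  intro c hc
  rcases List.mem_map.mp hc with ⟨d, _, hd⟩
  rcases pvBlank_space_or_nospace d with h | h
  · exact Or.inl (by rw [← hd, h])
  · exact Or.inr (by rw [← hd]; exact h)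

lemma pvStepAgree (line : String) (acc : List (List (List Char))) (carry : List (List Char))
    (hinv : pvInv carry) :
    pvStepA (acc, [], carry.flatten) line
      = ((pvStepB (acc, carry) line).1, [], (pvStepB (acc, carry) line).2.flatten) := by
  obtain ⟨hne, hns⟩ := hinv
  have hA : pvStepA (acc, [], carry.flatten) line
      = (acc ++ [(line.toList.foldl pvInnerA ([], carry.flatten)).1], [],
         (line.toList.foldl pvInnerA ([], carry.flatten)).2) := rfl
  rw [hA, pvMach line.toList carry.flatten hns]
  simp only [pvStepB, pvSplit₀_eq, pvJoin_nil]
  by_cases hcar : carry = []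
  · -- no pending term
    subst hcar
    simp only [List.flatten_nil, List.isEmpty_nil, Bool.not_true, Bool.false_and,
      Bool.false_eq_true, if_false, List.nil_append]
    by_cases htoks : pvWords [] (line.toList.map pvBlank) = []
    · have hcond : (!(line.toList.map pvBlank).isEmpty
          && !((line.toList.map pvBlank).getLastD ' ' == ' ')) = false := by
        by_cases hm0 : line.toList.map pvBlank = []
        · simp [hm0]
        · obtain ⟨x, hx⟩ : ∃ x, (line.toList.map pvBlank).getLast? = some x :=
            ⟨_, List.getLast?_eq_some_getLast hm0⟩
          rcases pvBlank_images line.toList x (List.mem_of_getLast? hx) with hsp | hsp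
          · simp [List.getLastD_eq_getLast?, hx, hsp]
          · exact absurd htoks (pvWords_ne_nil _ [] x hx hsp)
      simp [htoks, hcond]
    · have htoksf : (pvWords [] (line.toList.map pvBlank)).isEmpty = false := by
        simpa [List.isEmpty_iff] using htoks
      simp only [htoksf, Bool.not_false, if_true]
      by_cases hcond : ((line.toList.map pvBlank).getLastD ' ' == ' ') = true
      · have hcond' : (Option.map pvBlank line.toList.getLast?).getD ' ' = ' ' := by
          simpa [List.getLastD_eq_getLast?, List.getLast?_map] using hcond
        simp [hcond']
      · simp only [Bool.not_eq_true] at hcond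
        have hcond' : ¬ (Option.map pvBlank line.toList.getLast?).getD ' ' = ' ' := by
          simpa [List.getLastD_eq_getLast?, List.getLast?_map] using hcond
        have hline : ¬ line = "" := by
          intro h; subst h; simp [pvWords] at htoks
        simp [hcond', hline]
  · -- a term is pending: carry ≠ [] and (invariant) flatten carry ≠ [], all non-space
    have hp : carry.flatten ≠ [] := by
      cases carry with
      | nil => exact absurd rfl hcar
      | cons p ps =>
        have hp0 : p ≠ [] := hne p (by simp)
        simp only [List.flatten_cons, ne_eq, List.append_eq_nil_iff]
        intro h
        exact hp0 h.1
    have hcarE : carry.isEmpty = false := by simpa [List.isEmpty_iff] using hcar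
    have hflat : ¬ ∀ l ∈ carry, l = [] := by
      intro hall
      exact hp (by simpa [List.flatten_eq_nil_iff] using hall)
    cases hl : line.toList with
    | nil =>
      have hlastb : (carry.flatten.getLastD ' ' == ' ') = false := by
        have hmem : carry.flatten.getLastD ' ' ∈ carry.flatten := by
          rw [List.getLastD_eq_getLast?, List.getLast?_eq_some_getLast (l := carry.flatten) hp]
          exact List.getLast_mem hp
        have hsp := hns _ hmem
        rw [beq_eq_false_iff_ne]
        intro h
        rw [h, pvSpace_true] at hsp
        exact Bool.true_eq_false.mp hsp
      have hpE : carry.flatten.isEmpty = false := by simpa [List.isEmpty_iff] using hp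
      simp only [hl, List.map_nil, List.append_nil]
      rw [pvWords_nospace carry.flatten [] hns]
      have hlastp : ¬ carry.flatten.getLast?.getD ' ' = ' ' := by
        simpa [List.getLastD_eq_getLast?, beq_eq_false_iff_ne] using hlastb
      simp [pvWords, hpE, hlastb, hlastp, hp]
    | cons c rest =>
      simp only [hl, List.map_cons]
      rcases pvBlank_space_or_nospace c with hc | hc
      · -- blanked line starts with a space: the pending term is flushed first
        simp only [hc]
        rw [pvWords_split carry.flatten [] (rest.map pvBlank) hns, pvWords_cons_space]
        have hiE : (carry.flatten ++ ' ' :: rest.map pvBlank).isEmpty = false := by simp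
        have hglD : (carry.flatten ++ ' ' :: rest.map pvBlank).getLastD ' '
            = (' ' :: rest.map pvBlank).getLastD ' ' := by
          rw [List.getLastD_eq_getLast?, List.getLastD_eq_getLast?, pvGetLast?_append_cons]
        rw [hglD]
        have hhead : ((' ' :: rest.map pvBlank).headD ' ' == ' ') = true := by simp
        by_cases hW : pvWords [] (rest.map pvBlank) = []
        · have hcond : ((' ' :: rest.map pvBlank).getLastD ' ' == ' ') = true := by
            cases hr : rest.map pvBlank with
            | nil => simp
            | cons b m' =>
              obtain ⟨x, hx⟩ : ∃ x, (b :: m').getLast? = some x :=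
                ⟨_, List.getLast?_eq_some_getLast (by simp)⟩
              rcases pvBlank_images rest x (by rw [hr]; exact List.mem_of_getLast? hx)
                  with hxs | hxs
              · simp [List.getLastD_eq_getLast?, List.getLast?_cons_cons, hx, hxs]
              · rw [hr] at hW
                exact absurd hW (pvWords_ne_nil _ [] x hx hxs)
          have hcondp : (' ' :: List.map pvBlank rest).getLast?.getD ' ' = ' ' := by
            simpa [List.getLastD_eq_getLast?] using hcond
          simp [hW, hcond, hcondp, hhead, hcarE, pvJoin_nil, hp, hflat]
        · have hWE : (pvWords [] (rest.map pvBlank)).isEmpty = false := by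
            simpa [List.isEmpty_iff] using hW
          by_cases hcond : ((' ' :: rest.map pvBlank).getLastD ' ' == ' ') = true
          · have hcondp : (' ' :: List.map pvBlank rest).getLast?.getD ' ' = ' ' := by
              simpa [List.getLastD_eq_getLast?] using hcond
            simp [hcond, hcondp, hhead, hcarE, hWE, pvJoin_nil, hiE, hflat]
          · have hcondf : ((' ' :: rest.map pvBlank).getLastD ' ' == ' ') = false := by
              simpa using hcond
            have hcondp : ¬ (' ' :: List.map pvBlank rest).getLast?.getD ' ' = ' ' := by
              simpa [List.getLastD_eq_getLast?, beq_eq_false_iff_ne] using hcondf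
            simp [hcondf, hcondp, hhead, hcarE, hWE, pvJoin_nil, hiE, hflat,
              List.dropLast_append_of_ne_nil, hW,
              pvGetLastD_irrel (pvWords [] (rest.map pvBlank)) hW]
            refine ⟨List.dropLast_cons_of_ne_nil hW, ?_⟩
            cases hWc : pvWords [] (List.map pvBlank rest) with
            | nil => exact absurd hWc hW
            | cons w ws => simp [List.getLast?_cons_cons]
      · -- line starts with a term character: the first token continues the pending term
        have hsp : (pvBlank c == ' ') = false := by
          rw [beq_eq_false_iff_ne]
          intro h
          rw [h, pvSpace_true] at hc
          exact Bool.true_eq_false.mp hc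
        have hWt : pvWords [] (carry.flatten ++ pvBlank c :: rest.map pvBlank)
            = (carry.flatten ++ (pvWords [] (pvBlank c :: rest.map pvBlank)).headD []) ::
              (pvWords [] (pvBlank c :: rest.map pvBlank)).tail := by
          rw [pvWords_append_nospace carry.flatten [] _ hns]
          simpa using pvWords_head_decomp (rest.map pvBlank) (pvBlank c) carry.flatten hc
        have hglD : (carry.flatten ++ pvBlank c :: rest.map pvBlank).getLastD ' '
            = (pvBlank c :: rest.map pvBlank).getLastD ' ' := by
          rw [List.getLastD_eq_getLast?, List.getLastD_eq_getLast?, pvGetLast?_append_cons]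
        rw [hWt, hglD]
        cases hWc : pvWords [] (pvBlank c :: rest.map pvBlank) with
        | nil =>
          refine absurd hWc ?_
          rw [pvWords_head_decomp (rest.map pvBlank) (pvBlank c) [] hc]
          simp
        | cons w ws =>
          by_cases hcond : ((pvBlank c :: rest.map pvBlank).getLastD ' ' == ' ') = true
          · have hcondp : (pvBlank c :: rest.map pvBlank).getLast?.getD ' ' = ' ' := by
              simpa [List.getLastD_eq_getLast?] using hcond
            simp [hcond, hcondp, hsp, hcarE, pvJoin_nil, hflat]
          · have hcondf : ((pvBlank c :: rest.map pvBlank).getLastD ' ' == ' ') = false := by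
              simpa using hcond
            have hcondp : ¬ (pvBlank c :: rest.map pvBlank).getLast?.getD ' ' = ' ' := by
              simpa [List.getLastD_eq_getLast?, beq_eq_false_iff_ne] using hcondf
            cases ws with
            | nil =>
              simp [hcondf, hcondp, hsp, hcarE, pvJoin_nil, hflat]
            | cons w2 ws2 =>
              have hws : (w2 :: ws2) ≠ ([] : List (List Char)) := by simp
              simp [hcondf, hcondp, hsp, hcarE, pvJoin_nil, hflat,
                List.dropLast_cons_of_ne_nil hws,
                pvGetLastD_irrel (w2 :: ws2) hws]

lemma pvStepB_ne (st : List (List (List Char)) × List (List Char)) (line : String)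
    (h : ∀ p ∈ st.2, p ≠ []) : ∀ p ∈ (pvStepB st line).2, p ≠ [] := by
  intro p hp
  simp only [pvStepB, pvSplit₀_eq] at hp
  by_cases htoks : (pvWords [] (line.toList.map pvBlank)).isEmpty = true
  · simp only [htoks, Bool.not_true, Bool.false_eq_true, if_false] at hp
    split at hp <;> simp_all
  · have hW : pvWords [] (line.toList.map pvBlank) ≠ [] := by
      simpa [List.isEmpty_iff] using htoks
    have htok_ne : ∀ tok ∈ pvWords [] (line.toList.map pvBlank), tok ≠ [] :=
      pvWords_tokens_ne_nil _ []
    have hlast_ne : (pvWords [] (line.toList.map pvBlank)).getLastD [] ≠ [] := by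
      refine htok_ne _ ?_
      rw [List.getLastD_eq_getLast?, List.getLast?_eq_some_getLast (l := _) hW]
      exact List.getLast_mem hW
    simp only [htoks, Bool.not_false, if_true] at hp
    repeat' split at hp
    all_goals try simp_all
    all_goals
      (rcases hp with hp | hp
       · exact h p hp
       · subst hp; exact hlast_ne)

lemma pvOuter (lines : List String) : ∀ acc carry, pvInv carry →
    lines.foldl pvStepA (acc, [], carry.flatten) =
      ((lines.foldl pvStepB (acc, carry)).1, [], (lines.foldl pvStepB (acc, carry)).2.flatten) := by
  induction lines with
  | nil => intro acc carry _; simp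
  | cons line rest ih =>
    intro acc carry hinv
    simp only [List.foldl_cons]
    rw [pvStepAgree line acc carry hinv]
    have hflatten : (pvStepB (acc, carry) line).2.flatten
        = (line.toList.foldl pvInnerA ([], carry.flatten)).2 := by
      have := pvStepAgree line acc carry hinv
      have h2 := congrArg (fun p => p.2.2) this
      simpa using h2.symm
    have hinv' : pvInv (pvStepB (acc, carry) line).2 := by
      refine ⟨pvStepB_ne (acc, carry) line hinv.1, ?_⟩
      rw [hflatten]
      exact pvInnerA_nospace line.toList carry.flatten hinv.2
    exact ih (pvStepB (acc, carry) line).1 (pvStepB (acc, carry) line).2 hinv'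


-- ===== VERDICT (by name: the statement is the Claim_ definition above) =====
theorem take_terms_spec : Claim_equal_take_terms := by
  intro data_array _
  unfold Spec_take_terms take_terms take_terms_alt
  have h := pvOuter data_array [] [] ⟨by simp, by simp⟩
  simp only [List.flatten_nil] at h
  rw [h]
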